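-- pv_equiv track=rewrite | github.com/tonyp7/brainteasers | is_duo_digit/is_duo_digit.py | is_duo_digit
-- ===== SOURCE A (Python) =====
-- def is_duo_digit(number):
--
--     #represent the count of 0, 1, etc. etc.
--     counts = [0, 0, 0, 0, 0, 0, 0, 0, 0, 0]
--
--     #transform the number to its string representation, without the negative sign if any
--     str_n = str(abs(number))
--
--     #count each number
--     for c in str_n:
--         counts[ int(c) ] += 1
--
--     #check results
--     #the result is basically checking the number of unique digits used. eg: if the count is > 0
--     #that means the number has been used.
--     unique = 0
--     for count in counts:
--         if count > 0:
--             unique += 1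
--
--     if unique <= 2:
--         return 'y'
--     else:
--         return 'n'
-- ===== SOURCE B (Python) =====
-- def is_duo_digit(number):
--     # single pass with early exit: track distinct digits, bail out past two
--     seen = set()
--     for c in str(abs(number)):
--         seen.add(c)
--         if len(seen) > 2:
--             return 'n'
--     return 'y'
-- ===== Notes on version B (the rewrite author's own statement) =====
-- stated objective: simpler
-- what changed: Replaces the ten-slot count array plus a second scan over the buckets with a single early-exiting pass that collects distinct digit characters in a set and answers 'n' as soon as a third distinct digit appears.
import Mathlib
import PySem

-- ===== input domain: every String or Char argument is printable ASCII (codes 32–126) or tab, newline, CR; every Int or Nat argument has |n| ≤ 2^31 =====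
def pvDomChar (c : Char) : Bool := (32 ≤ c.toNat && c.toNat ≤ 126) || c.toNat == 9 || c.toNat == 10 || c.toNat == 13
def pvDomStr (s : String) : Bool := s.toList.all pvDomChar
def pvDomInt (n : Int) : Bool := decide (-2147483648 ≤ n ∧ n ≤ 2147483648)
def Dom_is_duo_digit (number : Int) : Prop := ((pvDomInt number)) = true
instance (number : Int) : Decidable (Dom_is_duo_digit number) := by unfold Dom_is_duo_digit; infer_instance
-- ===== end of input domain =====

-- B replaces A's ten-bucket count array and second scan by one early-exiting pass over a set of distinct digits.

-- ===== PORT A =====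
def is_duo_digit (number : Int) : String :=
  -- counts = [0,0,0,0,0,0,0,0,0,0]
  let counts : List Int := [0, 0, 0, 0, 0, 0, 0, 0, 0, 0]
  -- str_n = str(abs(number))
  let str_n := PySem.Int.toStr |number|
  -- for c in str_n: counts[int(c)] += 1
  -- int(c) is ported as c.toNat - 48: exact for the digit characters str(abs(number)) produces
  let counts := str_n.toList.foldl (fun counts c =>
      let i : Nat := c.toNat - 48
      PySem.List.pySetD counts (i : Int) (PySem.List.pyGetD counts (i : Int) 0 + 1)) counts
  -- unique = 0; for count in counts: if count > 0: unique += 1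
  let unique := counts.foldl (fun unique count => if count > 0 then unique + 1 else unique) (0 : Int)
  if unique ≤ 2 then "y" else "n"

-- ===== PORT B =====
-- the for-loop of Source B with its early 'return n'
def duoGo : List Char → PySem.Set Char → String
  | [], _ => "y"
  | c :: cs, seen =>
    let seen := PySem.Set.add seen c
    if 2 < PySem.Set.len seen then "n" else duoGo cs seen

def is_duo_digit_alt (number : Int) : String :=
  duoGo (PySem.Int.toStr |number|).toList PySem.Set.empty

-- ===== PRECONDITION & SPEC =====
def Spec_is_duo_digit (number : Int) (out : String) : Prop := out = is_duo_digit_alt number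
instance (number : Int) (out : String) : Decidable (Spec_is_duo_digit number out) := by unfold Spec_is_duo_digit; infer_instance

-- ===== CLAIM (what is proved, stated in full; the proofs are below) =====
def Claim_equal_is_duo_digit : Prop := ∀ (number : Int), Dom_is_duo_digit number → Spec_is_duo_digit number (is_duo_digit number)

-- ===== LEMMAS AND PROOFS =====

def IsDigitChar (c : Char) : Prop := 48 ≤ c.toNat ∧ c.toNat ≤ 57

lemma digitChar_toNat (m : Nat) (h : m < 10) : (Nat.digitChar m).toNat = 48 + m := by
  interval_cases m <;> rfl

lemma mem_toDigitsCore (f : Nat) : ∀ (n : Nat) (l : List Char),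
    (∀ x ∈ l, IsDigitChar x) → ∀ c ∈ Nat.toDigitsCore 10 f n l, IsDigitChar c := by
  induction f with
  | zero => intro n l hl c hc; exact hl c hc
  | succ f ih =>
    intro n l hl c hc
    simp only [Nat.toDigitsCore] at hc
    have hd : IsDigitChar (Nat.digitChar (n % 10)) := by
      have : n % 10 < 10 := Nat.mod_lt _ (by norm_num)
      constructor <;> rw [digitChar_toNat _ this] <;> omega
    have hl' : ∀ x ∈ (Nat.digitChar (n % 10) :: l), IsDigitChar x := by
      intro x hx; rcases List.mem_cons.mp hx with h | h
      · exact h ▸ hd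
      · exact hl x h
    by_cases h : n / 10 = 0
    · simp only [h, if_pos rfl] at hc
      exact hl' c hc
    · rw [if_neg h] at hc
      exact ih _ _ hl' c hc

lemma digits_toChars (n : Int) (hn : 0 ≤ n) : ∀ c ∈ PySem.Int.toChars n, IsDigitChar c := by
  intro c hc
  simp only [PySem.Int.toChars, if_neg (not_lt.mpr hn)] at hc
  exact mem_toDigitsCore _ _ [] (by simp) c hc

lemma digit_inj {c d : Char} (hc : IsDigitChar c) (hd : IsDigitChar d)
    (h : c.toNat - 48 = d.toNat - 48) : c = d := by
  obtain ⟨hc1, _⟩ := hc; obtain ⟨hd1, _⟩ := hd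
  have : c.toNat = d.toNat := by omega
  have := congrArg Char.ofNat this
  simpa [Char.ofNat_toNat] using this

-- the second loop of A counts the positive buckets
lemma foldl_unique (cs : List Int) : ∀ (a : Int),
    cs.foldl (fun u c => if c > 0 then u + 1 else u) a
      = a + (cs.countP (fun x => decide (0 < x)) : Int) := by
  induction cs with
  | nil => simp
  | cons c cs ih =>
    intro a
    simp only [List.foldl_cons, List.countP_cons, ih]
    split <;> rename_i h <;> simp_all <;> push_cast <;> omega

lemma countP_set (p : Int → Bool) : ∀ (cs : List Int) (i : Nat) (w : Int), i < cs.length →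
    (cs.set i w).countP p + (if p (cs.getD i 0) then 1 else 0)
      = cs.countP p + (if p w then 1 else 0) := by
  intro cs
  induction cs with
  | nil => intro i w h; simp at h
  | cons c cs ih =>
    intro i w h
    cases i with
    | zero =>
      simp only [List.set_cons_zero, List.countP_cons, List.getD_cons_zero]
      by_cases h1 : p w <;> by_cases h2 : p c <;> simp [h1, h2]
    | succ i =>
      simp only [List.set_cons_succ, List.countP_cons, List.getD_cons_succ]
      have := ih i w (by simpa using Nat.lt_of_succ_lt_succ h)
      omega

lemma length_set_add (s : PySem.Set Char) (c : Char) :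
    (PySem.Set.add s c).length = if c ∈ s then s.length else s.length + 1 := by
  simp only [PySem.Set.add]
  split <;> rename_i h <;> simp_all [PySem.Set.contains]

lemma length_le_update (l : List Char) : ∀ (s : PySem.Set Char),
    s.length ≤ (PySem.Set.update s l).length := by
  induction l with
  | nil => intro s; simp [PySem.Set.update]
  | cons c l ih =>
    intro s
    have h1 : s.length ≤ (PySem.Set.add s c).length := by
      rw [length_set_add]; split <;> omega
    calc s.length ≤ (PySem.Set.add s c).length := h1
      _ ≤ _ := by simpa [PySem.Set.update] using ih (PySem.Set.add s c)

-- B's loop answers by comparing the final distinct-digit count with 2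
lemma duoGo_spec (ds : List Char) : ∀ (s : PySem.Set Char), s.length ≤ 2 →
    duoGo ds s = if (PySem.Set.update s ds).length ≤ 2 then "y" else "n" := by
  induction ds with
  | nil => intro s hs; simp [duoGo, PySem.Set.update, hs]
  | cons c ds ih =>
    intro s hs
    simp only [duoGo, PySem.Set.len]
    have hupd : PySem.Set.update s (c :: ds) = PySem.Set.update (PySem.Set.add s c) ds := by
      simp [PySem.Set.update]
    by_cases h : 2 < ((PySem.Set.add s c).length : Int)
    · rw [if_pos h]
      have := length_le_update ds (PySem.Set.add s c)
      rw [hupd, if_neg (by omega)]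
    · rw [if_neg h]
      rw [ih (PySem.Set.add s c) (by omega), hupd]

def bucketStep (counts : List Int) (c : Char) : List Int :=
  let i : Nat := c.toNat - 48
  PySem.List.pySetD counts (i : Int) (PySem.List.pyGetD counts (i : Int) 0 + 1)

-- the invariant of A's first loop, proved from the right end of the digit list
lemma foldA_inv (ds : List Char) (hds : ∀ c ∈ ds, IsDigitChar c) :
    (ds.foldl bucketStep [0,0,0,0,0,0,0,0,0,0]).length = 10 ∧
    (∀ j : Nat, 0 ≤ (ds.foldl bucketStep [0,0,0,0,0,0,0,0,0,0]).getD j 0 ∧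
      (0 < (ds.foldl bucketStep [0,0,0,0,0,0,0,0,0,0]).getD j 0 ↔ ∃ c ∈ ds, c.toNat - 48 = j)) ∧
    (ds.foldl bucketStep [0,0,0,0,0,0,0,0,0,0]).countP (fun x => decide (0 < x))
      = (PySem.Set.ofList ds).length := by
  induction ds using List.reverseRecOn with
  | nil =>
    refine ⟨rfl, ?_, rfl⟩
    intro j
    refine ⟨?_, ?_, ?_⟩
    · match j with
      | 0 | 1 | 2 | 3 | 4 | 5 | 6 | 7 | 8 | 9 => simp [List.getD]
      | (n+10) => simp [List.getD]
    · intro h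
      exfalso
      match j with
      | 0 | 1 | 2 | 3 | 4 | 5 | 6 | 7 | 8 | 9 => simp [List.getD] at h
      | (n+10) => simp [List.getD] at h
    · rintro ⟨c, hc, -⟩; simp at hc
  | append_singleton ds c ih =>
    have hdigits : ∀ x ∈ ds, IsDigitChar x := fun x hx => hds x (by simp [hx])
    have hc : IsDigitChar c := hds c (by simp)
    obtain ⟨hlen, hget, hcount⟩ := ih hdigits
    set cs := ds.foldl bucketStep [0,0,0,0,0,0,0,0,0,0] with hcs
    have hi : c.toNat - 48 < 10 := by obtain ⟨h1, h2⟩ := hc; omega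
    set i : Nat := c.toNat - 48 with hidef
    have hstep : (ds ++ [c]).foldl bucketStep [0,0,0,0,0,0,0,0,0,0]
        = cs.set i (cs.getD i 0 + 1) := by
      rw [List.foldl_append]
      simp [bucketStep, PySem.List.pySetD_natCast, PySem.List.pyGetD_natCast, hcs, List.getD]
      rfl
    have hilen : i < cs.length := by omega
    have hmemPos : 0 < cs.getD i 0 ↔ c ∈ ds := by
      rw [(hget i).2]
      constructor
      · rintro ⟨c', hc', hb⟩
        have : c' = c := digit_inj (hdigits c' hc') hc hb
        exact this ▸ hc'
      · intro h; exact ⟨c, h, rfl⟩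
    rw [hstep]
    refine ⟨by simp [hlen], ?_, ?_⟩
    · intro j
      by_cases hji : j = i
      · have hgd : (cs.set i (cs.getD i 0 + 1)).getD j 0 = cs.getD i 0 + 1 := by
          rw [hji]
          simp [List.getD, List.getElem?_set_self hilen]
        rw [hgd]
        refine ⟨by have := (hget i).1; omega, fun _ => ⟨c, by simp, by omega⟩,
          fun _ => by have := (hget i).1; omega⟩
      · have hgd : (cs.set i (cs.getD i 0 + 1)).getD j 0 = cs.getD j 0 := by
          simp [List.getD, List.getElem?_set_ne (fun h => hji h.symm)]
        rw [hgd]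
        refine ⟨(hget j).1, ?_⟩
        rw [(hget j).2]
        constructor
        · rintro ⟨c', h1, h2⟩; exact ⟨c', by simp [h1], h2⟩
        · rintro ⟨c', h1, h2⟩
          rcases (List.mem_append.mp h1) with h | h
          · exact ⟨c', h, h2⟩
          · simp at h; subst h; omega
    · have hset := countP_set (fun x => decide (0 < x)) cs i (cs.getD i 0 + 1) hilen
      have hofl : PySem.Set.ofList (ds ++ [c]) = PySem.Set.add (PySem.Set.ofList ds) c := by
        simp [PySem.Set.ofList_eq_foldl, List.foldl_append]
      rw [hofl, length_set_add]
      have hmem : c ∈ PySem.Set.ofList ds ↔ c ∈ ds := PySem.Set.mem_ofList ds c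
      have hpos : (0 < cs.getD i 0 + 1) := by have := (hget i).1; omega
      simp only [decide_eq_true_eq] at hset
      by_cases h : c ∈ ds
      · rw [if_pos (hmem.mpr h)]
        rw [if_pos (hmemPos.mpr h), if_pos hpos] at hset
        omega
      · rw [if_neg (fun hx => h (hmem.mp hx))]
        have h0 : cs.getD i 0 = 0 := by
          have h1 := (hget i).1
          have h2 : ¬ 0 < cs.getD i 0 := fun hp => h (hmemPos.mp hp)
          omega
        rw [h0] at hset ⊢
        rw [if_pos (by omega : (0:Int) < 0 + 1), if_neg (by omega : ¬ (0:Int) < 0)] at hset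
        omega

-- ===== VERDICT (by name: the statement is the Claim_ definition above) =====
theorem is_duo_digit_spec : Claim_equal_is_duo_digit := by
  intro number _
  unfold Spec_is_duo_digit is_duo_digit is_duo_digit_alt
  have hdig : ∀ c ∈ (PySem.Int.toStr |number|).toList, IsDigitChar c := by
    rw [PySem.Int.toList_toStr]
    exact digits_toChars _ (abs_nonneg number)
  obtain ⟨-, -, hcount⟩ := foldA_inv _ hdig
  have hcount' : ((PySem.Int.toStr |number|).toList.foldl (fun counts c =>
      PySem.List.pySetD counts ((c.toNat - 48 : Nat) : Int)
        (PySem.List.pyGetD counts ((c.toNat - 48 : Nat) : Int) 0 + 1)) ([0,0,0,0,0,0,0,0,0,0] : List Int)).countP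
      (fun x => decide (0 < x)) = (PySem.Set.ofList (PySem.Int.toStr |number|).toList).length := hcount
  rw [duoGo_spec _ PySem.Set.empty (by simp [PySem.Set.empty])]
  have hupd : PySem.Set.update PySem.Set.empty (PySem.Int.toStr |number|).toList
      = PySem.Set.ofList (PySem.Int.toStr |number|).toList := by
    simp [PySem.Set.update_nil_left]
  simp only [foldl_unique, hupd]
  rw [hcount']
  split <;> rename_i h <;> split <;> rename_i h2 <;> first | rfl | (exfalso; omega)
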